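-- pv_equiv track=rewrite | github.com/caiotaavares/compilador | compiler/bytecode.py | generate_bytecode
-- ===== SOURCE A (Python) =====
-- def infix_to_rpn(tokens):
--     prec = {
--         'OPERADOR_SOMA': 1,
--         'OPERADOR_SUBTRACAO': 1,
--         'OPERADOR_MULTIPLICACAO': 2,
--         'OPERADOR_DIV': 2
--     }
--     output = []
--     stack = []
--     for t in tokens:
--         tok = t['token']
--         if tok in ('NUMERO_INTEIRO', 'IDENTIFICADOR'):
--             output.append(t)
--         elif tok in ('OPERADOR_SOMA', 'OPERADOR_SUBTRACAO', 'OPERADOR_MULTIPLICACAO', 'OPERADOR_DIV'):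
--             while stack and stack[-1]['token'] != 'ABRE_PARENTESES' and \
--                   prec.get(stack[-1]['token'], 0) >= prec[tok]:
--                 output.append(stack.pop())
--             stack.append(t)
--         elif tok == 'ABRE_PARENTESES':
--             stack.append(t)
--         elif tok == 'FECHA_PARENTESES':
--             while stack and stack[-1]['token'] != 'ABRE_PARENTESES':
--                 output.append(stack.pop())
--             stack.pop()  # discard '('
--     while stack:
--         output.append(stack.pop())
--     return output
--
-- def generate_bytecode(tokens):
--     code = []
--     i = 0
--     n = len(tokens)
--
--     while i < n:
--         t = tokens[i]
--         # Assignment: IDENTIFICADOR ':=' expr ';'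
--         if t['token'] == 'IDENTIFICADOR' and i+1 < n and tokens[i+1]['token'] == 'ATRIBUICAO':
--             var = t['lexema']
--             # find end of expression
--             j = i+2
--             while j < n and tokens[j]['token'] != 'PONTO_E_VIRGULA':
--                 j += 1
--             expr_tokens = tokens[i+2:j]
--             rpn = infix_to_rpn(expr_tokens)
--             # emit bytecode for RPN
--             for x in rpn:
--                 if x['token'] == 'NUMERO_INTEIRO':
--                     code.append(f"ICONST {x['lexema']}")
--                 elif x['token'] == 'IDENTIFICADOR':
--                     code.append(f"LOAD {x['lexema']}")
--                 elif x['token'] == 'OPERADOR_SOMA':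
--                     code.append("IADD")
--                 elif x['token'] == 'OPERADOR_SUBTRACAO':
--                     code.append("ISUB")
--                 elif x['token'] == 'OPERADOR_MULTIPLICACAO':
--                     code.append("IMUL")
--                 elif x['token'] == 'OPERADOR_DIV':
--                     code.append("IDIV")
--             code.append(f"STORE {var}")
--             i = j + 1
--             continue
--
--         # Read: 'READ' '(' IDENT ')' ';'
--         if t['token'] == 'PALAVRA_RESERVADA_READ':
--             var = tokens[i+2]['lexema']
--             code.append(f"READ {var}")
--             i += 4
--             continue
--
--         # Write: 'WRITE' '(' IDENT ')' ';'
--         if t['token'] == 'PALAVRA_RESERVADA_WRITE':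
--             var = tokens[i+2]['lexema']
--             code.append(f"WRITE {var}")
--             i += 4
--             continue
--
--         # TODO: support IF, WHILE, PROC CALL in future
--         i += 1
--
--     code.append("HALT")
--     return code
-- ===== SOURCE B (Python) =====
-- def generate_bytecode(tokens):
--     # Single left-to-right streaming pass: a pushdown state machine over the
--     # token list.  No index arithmetic, no slicing, no intermediate RPN list:
--     # each instruction is appended the moment it is determined.
--     OPC = {'OPERADOR_SOMA': 'IADD', 'OPERADOR_SUBTRACAO': 'ISUB',
--            'OPERADOR_MULTIPLICACAO': 'IMUL', 'OPERADOR_DIV': 'IDIV'}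
--     PREC = {'IADD': 1, 'ISUB': 1, 'IMUL': 2, 'IDIV': 2}
--
--     code = []
--     mode = 'scan'   # scan | asg | expr | key1 | key2 | skip
--     var = ''        # assignment target while in asg/expr
--     instr = ''      # 'READ' / 'WRITE' while in key1/key2
--     ops = []        # operator stack of opcodes and '(' markers, top = last
--
--     for t in tokens:
--         tok = t['token']
--         if mode == 'asg':
--             if tok == 'ATRIBUICAO':
--                 mode = 'expr'
--                 ops = []
--                 continue
--             mode = 'scan'
--         if mode == 'scan':
--             if tok == 'IDENTIFICADOR':
--                 var = t['lexema']
--                 mode = 'asg'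
--             elif tok == 'PALAVRA_RESERVADA_READ':
--                 instr = 'READ'
--                 mode = 'key1'
--             elif tok == 'PALAVRA_RESERVADA_WRITE':
--                 instr = 'WRITE'
--                 mode = 'key1'
--         elif mode == 'expr':
--             if tok == 'NUMERO_INTEIRO':
--                 code.append(f"ICONST {t['lexema']}")
--             elif tok == 'IDENTIFICADOR':
--                 code.append(f"LOAD {t['lexema']}")
--             elif tok in OPC:
--                 op = OPC[tok]
--                 while ops and ops[-1] != '(' and PREC[ops[-1]] >= PREC[op]:
--                     code.append(ops.pop())
--                 ops.append(op)
--             elif tok == 'ABRE_PARENTESES':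
--                 ops.append('(')
--             elif tok == 'FECHA_PARENTESES':
--                 while ops and ops[-1] != '(':
--                     code.append(ops.pop())
--                 if ops:
--                     ops.pop()
--             elif tok == 'PONTO_E_VIRGULA':
--                 while ops:
--                     op = ops.pop()
--                     if op != '(':
--                         code.append(op)
--                 code.append(f"STORE {var}")
--                 mode = 'scan'
--         elif mode == 'key1':
--             mode = 'key2'
--         elif mode == 'key2':
--             code.append(f"{instr} {t['lexema']}")
--             mode = 'skip'
--         elif mode == 'skip':
--             mode = 'scan'
--
--     if mode == 'expr':
--         while ops:
--             op = ops.pop()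
--             if op != '(':
--                 code.append(op)
--         code.append(f"STORE {var}")
--     code.append("HALT")
--     return code
-- ===== Notes on version B (the rewrite author's own statement) =====
-- stated objective: alternative
-- what changed: B replaces A's index-jumping dispatch (lookahead, semicolon search, slice, build an intermediate RPN token list, translate it in a second loop) by one left-to-right streaming pass: a pushdown state machine over the token list (modes scan/asg/expr/key1/key2/skip) that never slices and never builds an RPN list, emitting each instruction the moment it is determined.
-- outside the precondition, e.g. on generate_bytecode([{'token': 'NUMERO_INTEIRO'}]): A returns ['HALT'], B returns ['HALT']
import Mathlib
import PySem

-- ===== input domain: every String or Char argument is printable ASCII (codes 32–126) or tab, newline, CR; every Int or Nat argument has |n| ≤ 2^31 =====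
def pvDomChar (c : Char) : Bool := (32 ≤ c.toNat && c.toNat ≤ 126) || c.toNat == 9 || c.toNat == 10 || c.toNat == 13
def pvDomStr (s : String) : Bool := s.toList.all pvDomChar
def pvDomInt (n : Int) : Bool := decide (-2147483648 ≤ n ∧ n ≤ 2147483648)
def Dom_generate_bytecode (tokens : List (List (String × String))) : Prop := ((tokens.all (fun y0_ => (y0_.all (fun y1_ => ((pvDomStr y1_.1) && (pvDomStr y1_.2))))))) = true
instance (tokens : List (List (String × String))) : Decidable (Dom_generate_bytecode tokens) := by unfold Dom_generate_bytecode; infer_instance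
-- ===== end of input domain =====

-- B replaces A's index-jumping, slice-and-translate pipeline (with an intermediate RPN list)
-- by one streaming pass: a pushdown state machine over the token list (objective: alternative).

-- ===== PORT A =====
-- a token dict {'token': …, 'lexema': …} is an association list; lookup = first match,
-- .getD "" is only reached where Python would raise KeyError (excluded by Pre_)
def pvTok (t : List (String × String)) : String := (List.lookup "token" t).getD ""
def pvLex (t : List (String × String)) : String := (List.lookup "lexema" t).getD ""

-- prec dict of infix_to_rpn; prec.get(tok, 0)
def pvPrec (tok : String) : Int :=
  if tok = "OPERADOR_SOMA" then 1
  else if tok = "OPERADOR_SUBTRACAO" then 1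
  else if tok = "OPERADOR_MULTIPLICACAO" then 2
  else if tok = "OPERADOR_DIV" then 2
  else 0

def pvIsOpA (tok : String) : Bool :=
  tok == "OPERADOR_SOMA" || tok == "OPERADOR_SUBTRACAO" ||
  tok == "OPERADOR_MULTIPLICACAO" || tok == "OPERADOR_DIV"

-- the inner 'while stack and stack[-1] != '(' and prec.get(...) >= prec[tok]' loop (head = top of stack)
def rpnPopA (output stack : List (List (String × String))) (p : Int) :
    List (List (String × String)) × List (List (String × String)) :=
  match stack with
  | [] => (output, [])
  | s :: rest =>
    if pvTok s ≠ "ABRE_PARENTESES" ∧ pvPrec (pvTok s) ≥ p then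
      rpnPopA (output ++ [s]) rest p
    else (output, s :: rest)

-- 'while stack and stack[-1] != '(': pop; then stack.pop() discards '(' (empty stack = IndexError, outside Pre_)
def rpnCloseA (output stack : List (List (String × String))) :
    List (List (String × String)) × List (List (String × String)) :=
  match stack with
  | [] => (output, [])
  | s :: rest =>
    if pvTok s = "ABRE_PARENTESES" then (output, rest)
    else rpnCloseA (output ++ [s]) rest

def rpnStepA (st : List (List (String × String)) × List (List (String × String)))
    (t : List (String × String)) :
    List (List (String × String)) × List (List (String × String)) :=
  let tok := pvTok t
  if tok = "NUMERO_INTEIRO" ∨ tok = "IDENTIFICADOR" then (st.1 ++ [t], st.2)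
  else if pvIsOpA tok then
    let os := rpnPopA st.1 st.2 (pvPrec tok)
    (os.1, t :: os.2)
  else if tok = "ABRE_PARENTESES" then (st.1, t :: st.2)
  else if tok = "FECHA_PARENTESES" then rpnCloseA st.1 st.2
  else st

def infix_to_rpn (tokens : List (List (String × String))) : List (List (String × String)) :=
  let st := tokens.foldl rpnStepA ([], [])
  st.1 ++ st.2          -- final 'while stack: output.append(stack.pop())'

-- one iteration of A's 'for x in rpn' translation loop
def emit1 (x : List (String × String)) : List String :=
  let tok := pvTok x
  if tok = "NUMERO_INTEIRO" then ["ICONST " ++ pvLex x]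
  else if tok = "IDENTIFICADOR" then ["LOAD " ++ pvLex x]
  else if tok = "OPERADOR_SOMA" then ["IADD"]
  else if tok = "OPERADOR_SUBTRACAO" then ["ISUB"]
  else if tok = "OPERADOR_MULTIPLICACAO" then ["IMUL"]
  else if tok = "OPERADOR_DIV" then ["IDIV"]
  else []

-- 'while j < n and tokens[j]['token'] != 'PONTO_E_VIRGULA': j += 1'
def findSemiA (tokens : List (List (String × String))) (j : Nat) : Nat :=
  if h : j < tokens.length then
    if pvTok tokens[j] ≠ "PONTO_E_VIRGULA" then findSemiA tokens (j + 1) else j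
  else j
termination_by tokens.length - j

theorem findSemiA_ge (tokens : List (List (String × String))) (j : Nat) :
    j ≤ findSemiA tokens j := by
  unfold findSemiA
  split
  · split
    · have := findSemiA_ge tokens (j + 1); omega
    · exact le_refl j
  · exact le_refl j
termination_by tokens.length - j

-- A's main 'while i < n' statement dispatch, code as accumulator
def gbA (tokens : List (List (String × String))) (i : Nat) (code : List String) : List String :=
  if h : i < tokens.length then
    let t := tokens[i]
    if pvTok t = "IDENTIFICADOR" ∧ i + 1 < tokens.length ∧
        pvTok (tokens.getD (i + 1) []) = "ATRIBUICAO" then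
      let j := findSemiA tokens (i + 2)
      let expr := (tokens.drop (i + 2)).take (j - (i + 2))   -- tokens[i+2:j]
      let rpn := infix_to_rpn expr
      let code := rpn.foldl (fun c x => c ++ emit1 x) code
      gbA tokens (j + 1) (code ++ ["STORE " ++ pvLex t])
    else if pvTok t = "PALAVRA_RESERVADA_READ" then
      -- tokens[i+2] raises IndexError when out of range: outside Pre_
      gbA tokens (i + 4) (code ++ ["READ " ++ pvLex (tokens.getD (i + 2) [])])
    else if pvTok t = "PALAVRA_RESERVADA_WRITE" then
      gbA tokens (i + 4) (code ++ ["WRITE " ++ pvLex (tokens.getD (i + 2) [])])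
    else gbA tokens (i + 1) code
  else code ++ ["HALT"]
termination_by tokens.length - i
decreasing_by
  · have := findSemiA_ge tokens (i + 2); omega
  · omega
  · omega
  · omega

def generate_bytecode (tokens : List (List (String × String))) : List String :=
  gbA tokens 0 []

-- ===== PORT B =====
-- Source B is one streaming fold over the token list with a mode (state-machine) value;
-- the operator stack 'ops' holds opcode strings and "(" markers, head = top of stack.

-- OPC dict of Source B
def opcOf (tok : String) : Option String :=
  if tok = "OPERADOR_SOMA" then some "IADD"
  else if tok = "OPERADOR_SUBTRACAO" then some "ISUB"
  else if tok = "OPERADOR_MULTIPLICACAO" then some "IMUL"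
  else if tok = "OPERADOR_DIV" then some "IDIV"
  else none

-- PREC dict of Source B (keyed by opcode)
def precOp (op : String) : Int :=
  if op = "IADD" ∨ op = "ISUB" then 1
  else if op = "IMUL" ∨ op = "IDIV" then 2
  else 0

inductive BMode where
  | scan : BMode
  | asg : String → BMode                 -- saw the assignment target identifier
  | expr : String → List String → BMode  -- inside an expression: target + operator stack
  | key1 : String → BMode                -- saw READ/WRITE keyword, expecting '('
  | key2 : String → BMode                -- expecting the argument identifier
  | skip1 : BMode                        -- skip the closing ')'
deriving DecidableEq, Repr

-- 'while ops and ops[-1] != '(' and PREC[ops[-1]] >= PREC[op]: code.append(ops.pop())'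
def bPop (code : List String) (ops : List String) (p : Int) : List String × List String :=
  match ops with
  | [] => (code, [])
  | op :: rest =>
    if op ≠ "(" ∧ precOp op ≥ p then bPop (code ++ [op]) rest p else (code, op :: rest)

-- 'while ops and ops[-1] != '(': pop; if ops: ops.pop()'
def bClose (code : List String) (ops : List String) : List String × List String :=
  match ops with
  | [] => (code, [])
  | op :: rest => if op ≠ "(" then bClose (code ++ [op]) rest else (code, rest)

-- 'while ops: op = ops.pop(); if op != '(': code.append(op)'
def bDrain (code : List String) (ops : List String) : List String :=
  match ops with
  | [] => code
  | op :: rest => bDrain (if op ≠ "(" then code ++ [op] else code) rest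

-- the 'scan' branch of the for-loop body
def scanStep (code : List String) (t : List (String × String)) : List String × BMode :=
  let tok := pvTok t
  if tok = "IDENTIFICADOR" then (code, .asg (pvLex t))
  else if tok = "PALAVRA_RESERVADA_READ" then (code, .key1 "READ")
  else if tok = "PALAVRA_RESERVADA_WRITE" then (code, .key1 "WRITE")
  else (code, .scan)

-- the 'expr' branch of the for-loop body
def exprStep (code : List String) (v : String) (ops : List String)
    (t : List (String × String)) : List String × BMode :=
  let tok := pvTok t
  if tok = "NUMERO_INTEIRO" then (code ++ ["ICONST " ++ pvLex t], .expr v ops)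
  else if tok = "IDENTIFICADOR" then (code ++ ["LOAD " ++ pvLex t], .expr v ops)
  else
    match opcOf tok with
    | some op =>
      let r := bPop code ops (precOp op)
      (r.1, .expr v (op :: r.2))
    | none =>
      if tok = "ABRE_PARENTESES" then (code, .expr v ("(" :: ops))
      else if tok = "FECHA_PARENTESES" then
        let r := bClose code ops
        (r.1, .expr v r.2)
      else if tok = "PONTO_E_VIRGULA" then (bDrain code ops ++ ["STORE " ++ v], .scan)
      else (code, .expr v ops)

-- one iteration of Source B's 'for t in tokens' loop
def mStep (st : List String × BMode) (t : List (String × String)) : List String × BMode :=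
  match st.2 with
  | .scan => scanStep st.1 t
  | .asg v => if pvTok t = "ATRIBUICAO" then (st.1, .expr v []) else scanStep st.1 t
  | .expr v ops => exprStep st.1 v ops t
  | .key1 ins => (st.1, .key2 ins)
  | .key2 ins => (st.1 ++ [ins ++ " " ++ pvLex t], .skip1)
  | .skip1 => (st.1, .scan)

-- the trailing "if mode == 'expr': drain; STORE"
def mFinish (st : List String × BMode) : List String :=
  match st.2 with
  | .expr v ops => bDrain st.1 ops ++ ["STORE " ++ v]
  | _ => st.1

def generate_bytecode_alt (tokens : List (List (String × String))) : List String :=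
  mFinish (tokens.foldl mStep ([], BMode.scan)) ++ ["HALT"]

-- ===== PRECONDITION & SPEC =====
-- segment scanned by infix_to_rpn after a ':=' at position p (up to the next ';')
def pvSegOf (tokens : List (List (String × String))) (p : Nat) : List (List (String × String)) :=
  (tokens.drop (p + 1)).takeWhile (fun t => pvTok t != "PONTO_E_VIRGULA")

-- every prefix has no more ')' than '(' — exactly "no stack.pop() from an empty stack"
def pvBalanced (seg : List (List (String × String))) : Bool :=
  (List.range (seg.length + 1)).all (fun m =>
    (seg.take m).countP (fun t => pvTok t == "FECHA_PARENTESES") ≤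
    (seg.take m).countP (fun t => pvTok t == "ABRE_PARENTESES"))

-- Pre_ excludes exactly the inputs where A raises, slightly over-approximated by closed-form
-- conditions (a 'token'/'lexema' key or a READ/WRITE argument may be required even where A's
-- control flow happens to skip the token, and paren balance is required after every ':=' even
-- when it is not part of an assignment): see the claim's cites for excluded inputs A returns on.
def Pre_generate_bytecode (tokens : List (List (String × String))) : Prop :=
  (∀ t ∈ tokens, (List.lookup "token" t).isSome = true) ∧
  (∀ t ∈ tokens, (pvTok t = "NUMERO_INTEIRO" ∨ pvTok t = "IDENTIFICADOR") →
      (List.lookup "lexema" t).isSome = true) ∧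
  (∀ i : Nat, i < tokens.length →
      (pvTok (tokens.getD i []) = "PALAVRA_RESERVADA_READ" ∨
       pvTok (tokens.getD i []) = "PALAVRA_RESERVADA_WRITE") →
      i + 2 < tokens.length ∧ (List.lookup "lexema" (tokens.getD (i + 2) [])).isSome = true) ∧
  (∀ p : Nat, p < tokens.length → pvTok (tokens.getD p []) = "ATRIBUICAO" →
      pvBalanced (pvSegOf tokens p) = true)

instance (tokens : List (List (String × String))) : Decidable (Pre_generate_bytecode tokens) := by
  unfold Pre_generate_bytecode; infer_instance

def pvWitness_generate_bytecode : (List (List (String × String))) :=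
  [[("token", "IDENTIFICADOR"), ("lexema", "x")],
   [("token", "ATRIBUICAO"), ("lexema", ":=")],
   [("token", "NUMERO_INTEIRO"), ("lexema", "7")],
   [("token", "PONTO_E_VIRGULA"), ("lexema", ";")]]

def Spec_generate_bytecode (tokens : List (List (String × String))) (out : List String) : Prop := out = generate_bytecode_alt tokens
instance (tokens : List (List (String × String))) (out : List String) : Decidable (Spec_generate_bytecode tokens out) := by unfold Spec_generate_bytecode; infer_instance

-- ===== CLAIM (what is proved, stated in full; the proofs are below) =====
def Claim_equal_generate_bytecode : Prop := ∀ (tokens : List (List (String × String))), Dom_generate_bytecode tokens → Pre_generate_bytecode tokens → Spec_generate_bytecode tokens (generate_bytecode tokens)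

-- ===== LEMMAS AND PROOFS =====

-- A's raw-token operator stack seen through B's eyes: "(" marker or opcode string
def pvSig (s : List (String × String)) : String :=
  if pvTok s = "ABRE_PARENTESES" then "(" else (opcOf (pvTok s)).getD ""

-- A's stack only ever holds '(' tokens and operator tokens
def pvInv (stack : List (List (String × String))) : Prop :=
  ∀ s ∈ stack, pvTok s = "ABRE_PARENTESES" ∨ (opcOf (pvTok s)).isSome = true

theorem opc_spec (tok op : String) (h : opcOf tok = some op) :
    pvPrec tok = precOp op ∧ tok ≠ "ABRE_PARENTESES" ∧ tok ≠ "NUMERO_INTEIRO" ∧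
    tok ≠ "IDENTIFICADOR" ∧ tok ≠ "FECHA_PARENTESES" ∧ tok ≠ "PONTO_E_VIRGULA" ∧
    pvIsOpA tok = true ∧ op ≠ "(" ∧ (∀ x, pvTok x = tok → emit1 x = [op]) := by
  unfold opcOf at h
  split_ifs at h with h1 h2 h3 h4 <;>
    (try cases h) <;>
    (try subst h1) <;> (try subst h2) <;> (try subst h3) <;> (try subst h4) <;>
    refine ⟨by decide, by decide, by decide, by decide, by decide, by decide, by decide,
      by decide, ?_⟩ <;>
    (intro x hx; simp [emit1, hx])

theorem opc_none_of_not_op (tok : String) (h : pvIsOpA tok = false) : opcOf tok = none := by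
  unfold pvIsOpA at h
  unfold opcOf
  split_ifs with h1 h2 h3 h4 <;> simp_all

theorem opc_isSome_of_op (tok : String) (h : pvIsOpA tok = true) : (opcOf tok).isSome = true := by
  unfold pvIsOpA at h
  unfold opcOf
  split_ifs <;> simp_all

theorem pop_sim (stack : List (List (String × String))) (hInv : pvInv stack)
    (out : List (List (String × String))) (c0 : List String) (p : Int) :
    bPop (c0 ++ out.flatMap emit1) (stack.map pvSig) p =
      (c0 ++ (rpnPopA out stack p).1.flatMap emit1, (rpnPopA out stack p).2.map pvSig) ∧
    pvInv (rpnPopA out stack p).2 := by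
  induction stack generalizing out with
  | nil => exact ⟨by simp [bPop, rpnPopA], fun s hs => nomatch hs⟩
  | cons s rest ih =>
    have hrest : pvInv rest := fun x hx => hInv x (List.mem_cons_of_mem _ hx)
    rcases hInv s (List.mem_cons_self ..) with habre | hop
    · have hcond : ¬ (pvTok s ≠ "ABRE_PARENTESES" ∧ pvPrec (pvTok s) ≥ p) := by simp [habre]
      refine ⟨?_, ?_⟩
      · simp [rpnPopA, habre, pvSig, bPop]
      · simp only [rpnPopA, if_neg hcond]
        exact hInv
    · obtain ⟨op, hbop⟩ := Option.isSome_iff_exists.mp hop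
      obtain ⟨hprec, habre, _, _, _, _, _, hpar, hemit⟩ := opc_spec _ _ hbop
      have hsig : pvSig s = op := by simp [pvSig, habre, hbop]
      by_cases hq : precOp op ≥ p
      · have hrec := ih hrest (out ++ [s])
        have hcond : pvTok s ≠ "ABRE_PARENTESES" ∧ pvPrec (pvTok s) ≥ p :=
          ⟨habre, by rw [hprec]; exact hq⟩
        have hflat : c0 ++ (out ++ [s]).flatMap emit1 = (c0 ++ out.flatMap emit1) ++ [op] := by
          simp [List.flatMap_append, hemit s rfl]
        rw [hflat] at hrec
        have hbcond : op ≠ "(" ∧ precOp op ≥ p := ⟨hpar, hq⟩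
        simp only [rpnPopA, if_pos hcond, List.map_cons, hsig, bPop, if_pos hbcond]
        exact hrec
      · have hcond : ¬ (pvTok s ≠ "ABRE_PARENTESES" ∧ pvPrec (pvTok s) ≥ p) := by
          rw [hprec]; tauto
        refine ⟨?_, ?_⟩
        · simp only [rpnPopA, if_neg hcond, List.map_cons, hsig, bPop,
            if_neg (by tauto : ¬ (op ≠ "(" ∧ precOp op ≥ p))]
        · simp only [rpnPopA, if_neg hcond]
          exact hInv

theorem close_sim (stack : List (List (String × String))) (hInv : pvInv stack)
    (out : List (List (String × String))) (c0 : List String) :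
    bClose (c0 ++ out.flatMap emit1) (stack.map pvSig) =
      (c0 ++ (rpnCloseA out stack).1.flatMap emit1, (rpnCloseA out stack).2.map pvSig) ∧
    pvInv (rpnCloseA out stack).2 := by
  induction stack generalizing out with
  | nil => exact ⟨by simp [bClose, rpnCloseA], fun s hs => nomatch hs⟩
  | cons s rest ih =>
    have hrest : pvInv rest := fun x hx => hInv x (List.mem_cons_of_mem _ hx)
    rcases hInv s (List.mem_cons_self ..) with habre | hop
    · refine ⟨?_, ?_⟩
      · simp [rpnCloseA, habre, pvSig, bClose]
      · simp only [rpnCloseA, if_pos habre]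
        exact hrest
    · obtain ⟨op, hbop⟩ := Option.isSome_iff_exists.mp hop
      obtain ⟨_, habre, _, _, _, _, _, hpar, hemit⟩ := opc_spec _ _ hbop
      have hsig : pvSig s = op := by simp [pvSig, habre, hbop]
      have hrec := ih hrest (out ++ [s])
      have hflat : c0 ++ (out ++ [s]).flatMap emit1 = (c0 ++ out.flatMap emit1) ++ [op] := by
        simp [List.flatMap_append, hemit s rfl]
      rw [hflat] at hrec
      simp only [rpnCloseA, if_neg habre, List.map_cons, hsig, bClose, if_pos hpar]
      exact hrec

theorem drain_sim (stack : List (List (String × String))) (hInv : pvInv stack)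
    (out : List (List (String × String))) (c0 : List String) :
    bDrain (c0 ++ out.flatMap emit1) (stack.map pvSig) = c0 ++ (out ++ stack).flatMap emit1 := by
  induction stack generalizing out with
  | nil => simp [bDrain]
  | cons s rest ih =>
    have hrest : pvInv rest := fun x hx => hInv x (List.mem_cons_of_mem _ hx)
    rcases hInv s (List.mem_cons_self ..) with habre | hop
    · have hemit : emit1 s = [] := by simp [emit1, habre]
      have hsig : pvSig s = "(" := by simp [pvSig, habre]
      have := ih hrest (out ++ [s])
      simp only [List.flatMap_append, List.flatMap_cons, List.flatMap_nil, hemit,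
        List.append_nil] at this ⊢
      simpa [hsig, bDrain] using this
    · obtain ⟨op, hbop⟩ := Option.isSome_iff_exists.mp hop
      obtain ⟨_, habre, _, _, _, _, _, hpar, hemitOp⟩ := opc_spec _ _ hbop
      have hsig : pvSig s = op := by simp [pvSig, habre, hbop]
      have hemit : emit1 s = [op] := hemitOp s rfl
      have := ih hrest (out ++ [s])
      simp only [List.flatMap_append, List.flatMap_cons, List.flatMap_nil, hemit,
        List.append_nil] at this ⊢
      simpa [hsig, bDrain, if_pos hpar, List.append_assoc] using this

-- one expression token (not a semicolon): Source B's expr branch simulates A's rpn step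
theorem step_sim (out stack : List (List (String × String))) (hInv : pvInv stack)
    (c0 : List String) (v : String) (t : List (String × String))
    (hsem : pvTok t ≠ "PONTO_E_VIRGULA") :
    mStep (c0 ++ out.flatMap emit1, BMode.expr v (stack.map pvSig)) t =
      (c0 ++ (rpnStepA (out, stack) t).1.flatMap emit1,
       BMode.expr v ((rpnStepA (out, stack) t).2.map pvSig)) ∧
    pvInv (rpnStepA (out, stack) t).2 := by
  show exprStep _ v _ t = _ ∧ _
  by_cases hN : pvTok t = "NUMERO_INTEIRO"
  · refine ⟨?_, by simpa [rpnStepA, hN] using hInv⟩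
    simp [exprStep, rpnStepA, hN, emit1, List.flatMap_append]
  by_cases hI : pvTok t = "IDENTIFICADOR"
  · refine ⟨?_, by simpa [rpnStepA, hI] using hInv⟩
    simp [exprStep, rpnStepA, hI, emit1, List.flatMap_append]
  have hor : ¬ (pvTok t = "NUMERO_INTEIRO" ∨ pvTok t = "IDENTIFICADOR") := by tauto
  by_cases hOp : pvIsOpA (pvTok t) = true
  · obtain ⟨op, hbop⟩ := Option.isSome_iff_exists.mp (opc_isSome_of_op _ hOp)
    obtain ⟨hprec, habre, _, _, _, _, _, _, _⟩ := opc_spec _ _ hbop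
    obtain ⟨hpop, hpopInv⟩ := pop_sim stack hInv out c0 (precOp op)
    refine ⟨?_, ?_⟩
    · simp only [exprStep, if_neg hN, if_neg hI, hbop, rpnStepA, if_neg hor, if_pos hOp, hprec,
        List.map_cons]
      rw [hpop]
      simp [pvSig, habre, hbop]
    · simp only [rpnStepA, if_neg hor, if_pos hOp, hprec]
      intro x hx
      rcases List.mem_cons.mp hx with hx | hx
      · right; subst hx; simp [hbop]
      · exact hpopInv x hx
  · have hnone : opcOf (pvTok t) = none := opc_none_of_not_op _ (by simpa using hOp)
    by_cases hA : pvTok t = "ABRE_PARENTESES"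
    · refine ⟨?_, ?_⟩
      · simp [exprStep, rpnStepA, hA, opcOf, pvIsOpA, pvSig]
      · simp only [rpnStepA, if_neg hor, if_neg hOp, if_pos hA]
        intro x hx
        rcases List.mem_cons.mp hx with hx | hx
        · left; subst hx; exact hA
        · exact hInv x hx
    by_cases hFe : pvTok t = "FECHA_PARENTESES"
    · obtain ⟨hcl, hclInv⟩ := close_sim stack hInv out c0
      refine ⟨?_, ?_⟩
      · simp only [exprStep, if_neg hN, if_neg hI, hnone, if_neg hA, if_pos hFe,
          rpnStepA, if_neg hor, if_neg hOp]
        rw [hcl]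
      · simp only [rpnStepA, if_neg hor, if_neg hOp, if_neg hA, if_pos hFe]
        exact hclInv
    · refine ⟨?_, ?_⟩
      · simp [exprStep, rpnStepA, hN, hI, hOp, hA, hFe, hsem, hnone]
      · simp only [rpnStepA, if_neg hor, if_neg hOp, if_neg hA, if_neg hFe]
        exact hInv

-- A's fold over the expression slice tokens[j0:findSemi j0]
def aFold (tokens : List (List (String × String))) (j0 : Nat)
    (out stack : List (List (String × String))) :
    List (List (String × String)) × List (List (String × String)) :=
  ((tokens.drop j0).take (findSemiA tokens j0 - j0)).foldl rpnStepA (out, stack)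

-- the whole expression phase: folding Source B's machine from 'expr' mode over tokens[j0:]
-- equals A's "scan to the semicolon, fold rpnStepA over the slice" and either resumes in
-- scan mode after the semicolon or ends the stream still in expr mode
theorem expr_phase (tokens : List (List (String × String))) (j0 : Nat)
    (c0 : List String) (v : String) (out stack : List (List (String × String)))
    (hInv : pvInv stack) :
    ((tokens.drop j0).foldl mStep (c0 ++ out.flatMap emit1, BMode.expr v (stack.map pvSig)) =
      (if findSemiA tokens j0 < tokens.length then
        (tokens.drop (findSemiA tokens j0 + 1)).foldl mStep
          (c0 ++ ((aFold tokens j0 out stack).1 ++ (aFold tokens j0 out stack).2).flatMap emit1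
             ++ ["STORE " ++ v], BMode.scan)
      else
        (c0 ++ (aFold tokens j0 out stack).1.flatMap emit1,
         BMode.expr v ((aFold tokens j0 out stack).2.map pvSig)))) ∧
    pvInv (aFold tokens j0 out stack).2 := by
  by_cases h : j0 < tokens.length
  · rw [List.drop_eq_getElem_cons h]
    by_cases hsem : pvTok tokens[j0] = "PONTO_E_VIRGULA"
    · have hfs : findSemiA tokens j0 = j0 := by
        unfold findSemiA; rw [dif_pos h, if_neg (not_not_intro hsem)]
      have hfold : aFold tokens j0 out stack = (out, stack) := by
        simp [aFold, hfs]
      refine ⟨?_, by rw [hfold]; exact hInv⟩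
      have hstep : mStep (c0 ++ out.flatMap emit1, BMode.expr v (stack.map pvSig)) tokens[j0]
          = (c0 ++ (out ++ stack).flatMap emit1 ++ ["STORE " ++ v], BMode.scan) := by
        show exprStep _ v _ _ = _
        simp [exprStep, hsem, opcOf, drain_sim stack hInv out c0]
      rw [List.foldl_cons, hstep, hfold, hfs, if_pos h]
    · have hfs : findSemiA tokens j0 = findSemiA tokens (j0 + 1) := by
        conv_lhs => unfold findSemiA
        rw [dif_pos h, if_pos hsem]
      have hge : j0 + 1 ≤ findSemiA tokens (j0 + 1) := findSemiA_ge tokens (j0 + 1)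
      obtain ⟨hstep, hstepInv⟩ := step_sim out stack hInv c0 v tokens[j0] hsem
      have hafold : aFold tokens j0 out stack =
          aFold tokens (j0 + 1) (rpnStepA (out, stack) tokens[j0]).1
            (rpnStepA (out, stack) tokens[j0]).2 := by
        unfold aFold
        rw [hfs, List.drop_eq_getElem_cons h]
        have hsucc : findSemiA tokens (j0 + 1) - j0 =
            (findSemiA tokens (j0 + 1) - (j0 + 1)) + 1 := by omega
        rw [hsucc, List.take_succ_cons, List.foldl_cons]
      obtain ⟨ih1, ih2⟩ := expr_phase tokens (j0 + 1) c0 v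
        (rpnStepA (out, stack) tokens[j0]).1 (rpnStepA (out, stack) tokens[j0]).2 hstepInv
      refine ⟨?_, by rw [hafold]; exact ih2⟩
      rw [List.foldl_cons, hstep, hfs, hafold]
      exact ih1
  · have hfs : findSemiA tokens j0 = j0 := by unfold findSemiA; rw [dif_neg h]
    have hdrop : tokens.drop j0 = [] := List.drop_eq_nil_of_le (by omega)
    have hfold : aFold tokens j0 out stack = (out, stack) := by simp [aFold, hfs]
    refine ⟨?_, by rw [hfold]; exact hInv⟩
    rw [hdrop, hfold, hfs, if_neg h]
    rfl
termination_by tokens.length - j0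
decreasing_by omega

-- unfolding equations for gbA's four branches
theorem gbA_stop (tokens : List (List (String × String))) (i : Nat) (code : List String)
    (h : ¬ i < tokens.length) : gbA tokens i code = code ++ ["HALT"] := by
  unfold gbA; rw [dif_neg h]

theorem gbA_asg (tokens : List (List (String × String))) (i : Nat) (code : List String)
    (hi : i < tokens.length)
    (h1 : pvTok tokens[i] = "IDENTIFICADOR" ∧ i + 1 < tokens.length ∧
      pvTok (tokens.getD (i + 1) []) = "ATRIBUICAO") :
    gbA tokens i code = gbA tokens (findSemiA tokens (i + 2) + 1)
      ((infix_to_rpn ((tokens.drop (i + 2)).take (findSemiA tokens (i + 2) - (i + 2)))).foldl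
          (fun c x => c ++ emit1 x) code ++ ["STORE " ++ pvLex tokens[i]]) := by
  conv_lhs => unfold gbA
  rw [dif_pos hi]
  simp only [if_pos h1]

theorem gbA_read (tokens : List (List (String × String))) (i : Nat) (code : List String)
    (hi : i < tokens.length)
    (h1 : ¬ (pvTok tokens[i] = "IDENTIFICADOR" ∧ i + 1 < tokens.length ∧
      pvTok (tokens.getD (i + 1) []) = "ATRIBUICAO"))
    (h2 : pvTok tokens[i] = "PALAVRA_RESERVADA_READ") :
    gbA tokens i code =
      gbA tokens (i + 4) (code ++ ["READ " ++ pvLex (tokens.getD (i + 2) [])]) := by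
  conv_lhs => unfold gbA
  rw [dif_pos hi]
  simp only [if_neg h1, if_pos h2]

theorem gbA_write (tokens : List (List (String × String))) (i : Nat) (code : List String)
    (hi : i < tokens.length)
    (h1 : ¬ (pvTok tokens[i] = "IDENTIFICADOR" ∧ i + 1 < tokens.length ∧
      pvTok (tokens.getD (i + 1) []) = "ATRIBUICAO"))
    (h2 : pvTok tokens[i] ≠ "PALAVRA_RESERVADA_READ")
    (h3 : pvTok tokens[i] = "PALAVRA_RESERVADA_WRITE") :
    gbA tokens i code =
      gbA tokens (i + 4) (code ++ ["WRITE " ++ pvLex (tokens.getD (i + 2) [])]) := by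
  conv_lhs => unfold gbA
  rw [dif_pos hi]
  simp only [if_neg h1, if_neg h2, if_pos h3]

theorem gbA_other (tokens : List (List (String × String))) (i : Nat) (code : List String)
    (hi : i < tokens.length)
    (h1 : ¬ (pvTok tokens[i] = "IDENTIFICADOR" ∧ i + 1 < tokens.length ∧
      pvTok (tokens.getD (i + 1) []) = "ATRIBUICAO"))
    (h2 : pvTok tokens[i] ≠ "PALAVRA_RESERVADA_READ")
    (h3 : pvTok tokens[i] ≠ "PALAVRA_RESERVADA_WRITE") :
    gbA tokens i code = gbA tokens (i + 1) code := by
  conv_lhs => unfold gbA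
  rw [dif_pos hi]
  simp only [if_neg h1, if_neg h2, if_neg h3]

-- shared READ/WRITE case of gb_sim's induction step
theorem keyword_case (tokens : List (List (String × String)))
    (Hrw : ∀ p : Nat, p < tokens.length →
      (pvTok (tokens.getD p []) = "PALAVRA_RESERVADA_READ" ∨
       pvTok (tokens.getD p []) = "PALAVRA_RESERVADA_WRITE") → p + 2 < tokens.length)
    (k : Nat)
    (ih : ∀ (i : Nat) (code : List String), tokens.length - i ≤ k →
      gbA tokens i code = mFinish ((tokens.drop i).foldl mStep (code, BMode.scan)) ++ ["HALT"])
    (i : Nat) (code : List String) (hk : tokens.length - i ≤ k + 1) (hi : i < tokens.length)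
    (ins : String)
    (hkw : pvTok (tokens[i]'hi) = "PALAVRA_RESERVADA_READ" ∨
           pvTok (tokens[i]'hi) = "PALAVRA_RESERVADA_WRITE")
    (heq : gbA tokens i code =
      gbA tokens (i + 4) (code ++ [ins ++ " " ++ pvLex (tokens.getD (i + 2) [])]))
    (hs1 : mStep (code, BMode.scan) (tokens[i]'hi) = (code, BMode.key1 ins)) :
    gbA tokens i code =
      mFinish ((tokens.drop (i + 1)).foldl mStep (mStep (code, BMode.scan) (tokens[i]'hi)))
        ++ ["HALT"] := by
  have hi2 : i + 2 < tokens.length :=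
    Hrw i hi (by rw [List.getD_eq_getElem tokens [] hi]; exact hkw)
  rw [heq, hs1, List.getD_eq_getElem tokens [] hi2,
    List.drop_eq_getElem_cons (show i + 1 < tokens.length by omega), List.foldl_cons]
  have hs2 : mStep (code, BMode.key1 ins) (tokens[i + 1]'(by omega)) =
      (code, BMode.key2 ins) := rfl
  rw [hs2, List.drop_eq_getElem_cons hi2, List.foldl_cons]
  have hs3 : mStep (code, BMode.key2 ins) (tokens[i + 2]'hi2) =
      (code ++ [ins ++ " " ++ pvLex (tokens[i + 2]'hi2)], BMode.skip1) := rfl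
  rw [hs3]
  by_cases hi3 : i + 3 < tokens.length
  · rw [List.drop_eq_getElem_cons hi3, List.foldl_cons]
    have hs4 : mStep (code ++ [ins ++ " " ++ pvLex (tokens[i + 2]'hi2)], BMode.skip1)
        (tokens[i + 3]'hi3) = (code ++ [ins ++ " " ++ pvLex (tokens[i + 2]'hi2)], BMode.scan) :=
      rfl
    rw [hs4]
    exact ih (i + 4) _ (by omega)
  · rw [List.drop_eq_nil_of_le (by omega), gbA_stop tokens (i + 4) _ (by omega)]
    rfl

-- A's index dispatch equals Source B's machine over the token suffix, given that every
-- READ/WRITE keyword has its argument in range (Pre_'s third conjunct)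
theorem gb_sim (tokens : List (List (String × String)))
    (Hrw : ∀ p : Nat, p < tokens.length →
      (pvTok (tokens.getD p []) = "PALAVRA_RESERVADA_READ" ∨
       pvTok (tokens.getD p []) = "PALAVRA_RESERVADA_WRITE") → p + 2 < tokens.length) :
    ∀ (k i : Nat) (code : List String), tokens.length - i ≤ k →
      gbA tokens i code = mFinish ((tokens.drop i).foldl mStep (code, BMode.scan)) ++ ["HALT"] := by
  intro k
  induction k with
  | zero =>
    intro i code hk
    rw [gbA_stop tokens i code (by omega), List.drop_eq_nil_of_le (by omega)]
    rfl
  | succ k ih =>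
    intro i code hk
    by_cases hi : i < tokens.length
    · rw [List.drop_eq_getElem_cons hi, List.foldl_cons]
      by_cases h1 : pvTok tokens[i] = "IDENTIFICADOR" ∧ i + 1 < tokens.length ∧
          pvTok (tokens.getD (i + 1) []) = "ATRIBUICAO"
      · -- assignment statement
        rw [gbA_asg tokens i code hi h1]
        have hs1 : mStep (code, BMode.scan) tokens[i] = (code, BMode.asg (pvLex tokens[i])) := by
          show scanStep code _ = _
          simp [scanStep, h1.1]
        have hu : tokens.getD (i + 1) [] = tokens[i + 1]'h1.2.1 :=
          List.getD_eq_getElem tokens [] h1.2.1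
        have hs2 : mStep (code, BMode.asg (pvLex tokens[i])) (tokens[i + 1]'h1.2.1) =
            (code, BMode.expr (pvLex tokens[i]) []) := by
          show (if pvTok _ = "ATRIBUICAO" then _ else _) = _
          rw [if_pos (hu ▸ h1.2.2)]
        rw [hs1, List.drop_eq_getElem_cons h1.2.1, List.foldl_cons, hs2]
        obtain ⟨hep, hepInv⟩ := expr_phase tokens (i + 2) code (pvLex tokens[i]) [] []
          (fun s hs => nomatch hs)
        simp only [List.flatMap_nil, List.append_nil, List.map_nil] at hep
        rw [hep, PySem.List.foldl_append_eq_flatMap]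
        have hrpn : infix_to_rpn ((tokens.drop (i + 2)).take (findSemiA tokens (i + 2) - (i + 2)))
            = (aFold tokens (i + 2) [] []).1 ++ (aFold tokens (i + 2) [] []).2 := rfl
        rw [hrpn]
        have hge := findSemiA_ge tokens (i + 2)
        by_cases hjn : findSemiA tokens (i + 2) < tokens.length
        · rw [if_pos hjn]
          exact ih (findSemiA tokens (i + 2) + 1) _ (by omega)
        · rw [if_neg hjn, gbA_stop tokens _ _ (by omega)]
          show _ = bDrain _ _ ++ _ ++ _
          rw [drain_sim (aFold tokens (i + 2) [] []).2 hepInv (aFold tokens (i + 2) [] []).1 code]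
      · -- not an assignment
        by_cases hR : pvTok tokens[i] = "PALAVRA_RESERVADA_READ"
        · exact keyword_case tokens Hrw k ih i code hk hi "READ" (Or.inl hR)
            (gbA_read tokens i code hi h1 hR)
            (by simp [mStep, scanStep, hR])
        by_cases hW : pvTok tokens[i] = "PALAVRA_RESERVADA_WRITE"
        · exact keyword_case tokens Hrw k ih i code hk hi "WRITE" (Or.inr hW)
            (gbA_write tokens i code hi h1 hR hW)
            (by simp [mStep, scanStep, hW])
        rw [gbA_other tokens i code hi h1 hR hW]
        by_cases hI : pvTok tokens[i] = "IDENTIFICADOR"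
        · have hs1 : mStep (code, BMode.scan) tokens[i] = (code, BMode.asg (pvLex tokens[i])) := by
            show scanStep code _ = _
            simp [scanStep, hI]
          rw [hs1]
          by_cases hi1 : i + 1 < tokens.length
          · have hnA : pvTok (tokens[i + 1]'hi1) ≠ "ATRIBUICAO" := by
              intro hc
              exact h1 ⟨hI, hi1, by rw [List.getD_eq_getElem tokens [] hi1]; exact hc⟩
            have hsame : (tokens.drop (i + 1)).foldl mStep (code, BMode.asg (pvLex tokens[i])) =
                (tokens.drop (i + 1)).foldl mStep (code, BMode.scan) := by
              rw [List.drop_eq_getElem_cons hi1, List.foldl_cons, List.foldl_cons]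
              congr 1
              show (if pvTok _ = "ATRIBUICAO" then _ else _) = scanStep code _
              rw [if_neg hnA]
            rw [hsame]
            exact ih (i + 1) code (by omega)
          · rw [List.drop_eq_nil_of_le (by omega)]
            rw [gbA_stop tokens (i + 1) code (by omega)]
            rfl
        · have hs1 : mStep (code, BMode.scan) tokens[i] = (code, BMode.scan) := by
            show scanStep code _ = _
            simp [scanStep, hI, hR, hW]
          rw [hs1]
          exact ih (i + 1) code (by omega)
    · rw [gbA_stop tokens i code hi, List.drop_eq_nil_of_le (by omega)]
      rfl

-- ===== VERDICT (by name: the statement is the Claim_ definition above) =====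
theorem generate_bytecode_spec : Claim_equal_generate_bytecode := by
  intro tokens _ hpre
  unfold Spec_generate_bytecode generate_bytecode generate_bytecode_alt
  have := gb_sim tokens (fun p hp hrw => (hpre.2.2.1 p hp hrw).1) tokens.length 0 [] (by omega)
  simpa using this
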